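-- pv_equiv track=rewrite | github.com/mayurchavda/python-examples | codility-test/find_bug_in_prog.py | solution
-- ===== SOURCE A (Python) =====
-- def solution(N, K):
--     if N == 0:
--         return [""]
--     result = []
--     for p in solution(N - 1, K):
--         for l in "abc":
--             if p[-1:] != l:
--                 result += [p + l]
--     return result[:K]
-- ===== SOURCE B (Python) =====
-- def solution(N, K):
--     level = [""]
--     for _ in range(N):
--         level = [p + l for p in level for l in "abc" if p[-1:] != l][:K]
--     return level
-- ===== Notes on version B (the rewrite author's own statement) =====
-- stated objective: idiomatic
-- what changed: Replaces the linear recursion over N with an iterative bottom-up loop that rebuilds each level via a single list comprehension and slices it to K.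
import Mathlib
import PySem

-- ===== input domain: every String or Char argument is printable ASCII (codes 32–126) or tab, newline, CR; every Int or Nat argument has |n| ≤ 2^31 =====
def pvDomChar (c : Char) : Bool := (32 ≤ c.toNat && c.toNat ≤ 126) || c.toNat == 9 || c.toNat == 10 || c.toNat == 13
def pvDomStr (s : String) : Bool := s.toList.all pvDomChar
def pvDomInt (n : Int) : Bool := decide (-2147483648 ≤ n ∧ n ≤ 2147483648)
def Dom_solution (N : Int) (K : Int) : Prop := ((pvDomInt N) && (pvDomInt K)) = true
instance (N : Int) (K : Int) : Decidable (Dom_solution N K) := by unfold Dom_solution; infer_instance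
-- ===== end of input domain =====

-- B replaces A's linear recursion over N by an iterative bottom-up loop (comprehension per
-- level); equivalence is about the return value on N ≥ 0 (A raises RecursionError for N < 0).

-- ===== PORT A =====
-- literal port of A's recursion; the `N < 0` guard only totalises what Python leaves
-- diverging (RecursionError), excluded by Pre_solution.
def solution (N : Int) (K : Int) : List String :=
  if N = 0 then [""]
  else if N < 0 then []
  else
    let result : List String :=
      (solution (N - 1) K).foldl
        (fun result p =>
          (["a", "b", "c"] : List String).foldl
            (fun result l =>
              if PySem.Str.slice p (some (-1)) none != l then result ++ [p ++ l] else result)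
            result)
        []
    PySem.List.slice result none (some K)
termination_by N.toNat
decreasing_by omega

-- ===== PORT B =====
-- one loop iteration of B: level = [p + l for p in level for l in "abc" if p[-1:] != l][:K]
def solAltStep (K : Int) (level : List String) : List String :=
  PySem.List.slice
    (level.flatMap (fun p =>
      ((["a", "b", "c"] : List String).filter
          (fun l => PySem.Str.slice p (some (-1)) none != l)).map
        (fun l => p ++ l)))
    none (some K)

def solution_alt (N : Int) (K : Int) : List String :=
  (PySem.List.pyRange 0 N 1).foldl (fun level _ => solAltStep K level) [""]

-- ===== PRECONDITION & SPEC =====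
-- Pre_ excludes N < 0, where A's recursion never reaches its base case and raises RecursionError.
def Pre_solution (N : Int) (K : Int) : Prop := 0 ≤ N
instance (N : Int) (K : Int) : Decidable (Pre_solution N K) := by unfold Pre_solution; infer_instance
def pvWitness_solution : Int × Int := (3, 4)

def Spec_solution (N : Int) (K : Int) (out : List String) : Prop := out = solution_alt N K
instance (N : Int) (K : Int) (out : List String) : Decidable (Spec_solution N K out) := by unfold Spec_solution; infer_instance

-- ===== CLAIM (what is proved, stated in full; the proofs are below) =====
def Claim_equal_solution : Prop := ∀ (N : Int) (K : Int), Dom_solution N K → Pre_solution N K → Spec_solution N K (solution N K)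

-- ===== LEMMAS AND PROOFS =====

-- A's nested accumulator loops compute exactly one B step from the previous level.
theorem solution_body_eq (K : Int) (L : List String) :
    PySem.List.slice
      (L.foldl
        (fun result p =>
          (["a", "b", "c"] : List String).foldl
            (fun result l =>
              if PySem.Str.slice p (some (-1)) none != l then result ++ [p ++ l] else result)
            result)
        [])
      none (some K) = solAltStep K L := by
  unfold solAltStep
  congr 1
  simp only [PySem.List.foldl_append_if]
  exact PySem.List.foldl_append_eq_flatMap _ _ _

theorem solution_eq_alt_nat (n : Nat) (K : Int) : solution (n : Int) K = solution_alt (n : Int) K := by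
  induction n with
  | zero =>
    simp [solution, solution_alt, PySem.List.pyRange_one_eq_nil]
  | succ n ih =>
    have h1 : ¬ ((n : Int) + 1 = 0) := by omega
    have h2 : ¬ ((n : Int) + 1 < 0) := by omega
    rw [show ((n + 1 : Nat) : Int) = (n : Int) + 1 by push_cast; ring]
    rw [solution]
    simp only [h1, h2, if_false]
    rw [show ((n : Int) + 1 - 1) = (n : Int) by ring]
    rw [solution_body_eq, ih]
    unfold solution_alt
    rw [PySem.List.pyRange_one_succ_right (by omega), List.foldl_append]
    simp [List.foldl]

-- ===== VERDICT (by name: the statement is the Claim_ definition above) =====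
theorem solution_spec : Claim_equal_solution := by
  intro N K _ hPre
  unfold Spec_solution
  have h := solution_eq_alt_nat N.toNat K
  rwa [Int.toNat_of_nonneg hPre] at h
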